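-- pv_equiv track=rewrite | github.com/andeaseme/advent-of-code | 2023/01/solution.py | find_first_and_last_occuring_substring_from_list_of_substrings
-- ===== SOURCE A (Python) =====
-- def find_first_and_last_occuring_substring_from_list_of_substrings(
--     input_str, substrings
-- ):
--     first_substring = None
--     first_index = None
--     last_substring = None
--     last_index = None
--
--     for substring in substrings:
--         if substring in input_str:
--             if first_substring is None:
--                 first_substring = substring
--                 first_index = input_str.index(substring)
--                 last_substring = substring
--                 last_index = input_str.rindex(substring)
--             else:
--                 if input_str.index(substring) < first_index:
--                     first_substring = substring
--                     first_index = input_str.index(substring)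
--                 if input_str.rindex(substring) > last_index:
--                     last_substring = substring
--                     last_index = input_str.rindex(substring)
--     return first_substring, last_substring
-- ===== SOURCE B (Python) =====
-- def find_first_and_last_occuring_substring_from_list_of_substrings(
--     input_str, substrings
-- ):
--     # Scan positions of input_str instead of comparing per-substring indices:
--     # the first position (left-to-right) where any substring starts gives the
--     # first-occurring substring; the first position right-to-left gives the last.
--     def match_at(i):
--         for s in substrings:
--             if input_str.startswith(s, i):
--                 return s
--         return None
--
--     n = len(input_str)
--     first = next(
--         (m for m in map(match_at, range(n + 1)) if m is not None), None
--     )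
--     last = next(
--         (m for m in map(match_at, range(n, -1, -1)) if m is not None), None
--     )
--     return first, last
-- ===== Notes on version B (the rewrite author's own statement) =====
-- stated objective: alternative
-- what changed: Instead of A's per-substring loop comparing str.index/str.rindex values over the whole string, B scans the positions of input_str: the first position left-to-right (resp. right-to-left) at which any listed substring starts yields the first (resp. last) occurring substring, stopping at that position.
import Mathlib
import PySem

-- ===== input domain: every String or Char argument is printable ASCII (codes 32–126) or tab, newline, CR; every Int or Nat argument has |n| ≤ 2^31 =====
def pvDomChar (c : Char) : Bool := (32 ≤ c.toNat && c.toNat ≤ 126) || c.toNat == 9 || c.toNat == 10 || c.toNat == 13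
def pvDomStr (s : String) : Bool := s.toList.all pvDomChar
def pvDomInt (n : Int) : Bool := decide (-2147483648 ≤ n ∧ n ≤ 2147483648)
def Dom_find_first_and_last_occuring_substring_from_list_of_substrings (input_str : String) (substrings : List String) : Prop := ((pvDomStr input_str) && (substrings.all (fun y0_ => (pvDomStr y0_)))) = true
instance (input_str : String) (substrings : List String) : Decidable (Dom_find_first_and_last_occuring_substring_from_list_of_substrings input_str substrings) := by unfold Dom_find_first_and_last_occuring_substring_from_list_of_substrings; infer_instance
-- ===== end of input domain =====

-- ===== PORT A =====
-- B scans the POSITIONS of input_str instead of A's per-substring index/rindex comparison (objective: alternative).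
-- A's four variables first_substring/first_index/last_substring/last_index are always set together,
-- so the state is one Option of the 4-tuple; input_str.index/rindex are only reached under the
-- 'substring in input_str' guard, where PySem.Str.find/rfind are exact.
def pvInnerA (input_str : String)
    (st : Option (String × Int × String × Int)) (substring : String) :
    Option (String × Int × String × Int) :=
  match st with
    | none =>
        some (substring, PySem.Str.find input_str substring,
              substring, PySem.Str.rfind input_str substring)
    | some (first_substring, first_index, last_substring, last_index) =>
        let (first_substring, first_index) :=
          if PySem.Str.find input_str substring < first_index then
            (substring, PySem.Str.find input_str substring)
          else (first_substring, first_index)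
        let (last_substring, last_index) :=
          if last_index < PySem.Str.rfind input_str substring then
            (substring, PySem.Str.rfind input_str substring)
          else (last_substring, last_index)
        some (first_substring, first_index, last_substring, last_index)

def pvStepA (input_str : String)
    (st : Option (String × Int × String × Int)) (substring : String) :
    Option (String × Int × String × Int) :=
  if PySem.Str.isIn substring input_str then pvInnerA input_str st substring else st

def find_first_and_last_occuring_substring_from_list_of_substrings (input_str : String) (substrings : List String) : Option String × Option String :=
  match substrings.foldl (pvStepA input_str) none with
  | none => (none, none)
  | some (first_substring, _, last_substring, _) => (some first_substring, some last_substring)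

-- ===== PORT B =====
-- Source B's match_at(i): the first listed substring starting at position i, else None.
-- Python's input_str.startswith(s, i) for 0 ≤ i ≤ len(input_str) is exactly
-- "s.toList is a prefix of input_str.toList.drop i" (exact on this range, the only one scanned).
def pvMatchAt (input_str : String) (substrings : List String) (i : Nat) : Option String :=
  substrings.find? (fun s => PySem.Chars.startswith (input_str.toList.drop i) s.toList)

-- Source B's two break-on-first-hit scans: 'range(n+1)' left-to-right and 'range(n, -1, -1)'
-- right-to-left (the latter = the reversed ascending range), each stopping at the first match.
def find_first_and_last_occuring_substring_from_list_of_substrings_alt (input_str : String) (substrings : List String) : Option String × Option String :=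
  let n := input_str.toList.length
  ((List.range (n + 1)).findSome? (pvMatchAt input_str substrings),
   (List.range (n + 1)).reverse.findSome? (pvMatchAt input_str substrings))

-- ===== PRECONDITION & SPEC =====
def Spec_find_first_and_last_occuring_substring_from_list_of_substrings (input_str : String) (substrings : List String) (out : Option String × Option String) : Prop := out = find_first_and_last_occuring_substring_from_list_of_substrings_alt input_str substrings
instance (input_str : String) (substrings : List String) (out : Option String × Option String) : Decidable (Spec_find_first_and_last_occuring_substring_from_list_of_substrings input_str substrings out) := by unfold Spec_find_first_and_last_occuring_substring_from_list_of_substrings; infer_instance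

-- ===== CLAIM (what is proved, stated in full; the proofs are below) =====
def Claim_equal_find_first_and_last_occuring_substring_from_list_of_substrings : Prop := ∀ (input_str : String) (substrings : List String), Dom_find_first_and_last_occuring_substring_from_list_of_substrings input_str substrings → Spec_find_first_and_last_occuring_substring_from_list_of_substrings input_str substrings (find_first_and_last_occuring_substring_from_list_of_substrings input_str substrings)

-- ===== LEMMAS AND PROOFS =====

-- running min/max with a key, first extremum wins (the accumulator shape of A's loop)
def pvMinB (f : String → Int) (a : String) (l : List String) : String :=
  l.foldl (fun m x => if f x < f m then x else m) a

def pvMaxB (g : String → Int) (a : String) (l : List String) : String :=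
  l.foldl (fun m x => if g m < g x then x else m) a

-- A's loop keeps exactly (running min by find, its index, running max by rfind, its index)
lemma innerA_fold (i : String) :
    ∀ (l : List String) (fs ls : String),
      l.foldl (pvInnerA i) (some (fs, PySem.Str.find i fs, ls, PySem.Str.rfind i ls)) =
      some (pvMinB (fun s => PySem.Str.find i s) fs l,
            PySem.Str.find i (pvMinB (fun s => PySem.Str.find i s) fs l),
            pvMaxB (fun s => PySem.Str.rfind i s) ls l,
            PySem.Str.rfind i (pvMaxB (fun s => PySem.Str.rfind i s) ls l)) := by
  intro l
  induction l with
  | nil => intro fs ls; rfl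
  | cons x t ih =>
      intro fs ls
      simp only [List.foldl_cons, pvMinB, pvMaxB] at *
      have hstep : pvInnerA i (some (fs, PySem.Str.find i fs, ls, PySem.Str.rfind i ls)) x =
          some ((if PySem.Str.find i x < PySem.Str.find i fs then x else fs),
                PySem.Str.find i (if PySem.Str.find i x < PySem.Str.find i fs then x else fs),
                (if PySem.Str.rfind i ls < PySem.Str.rfind i x then x else ls),
                PySem.Str.rfind i (if PySem.Str.rfind i ls < PySem.Str.rfind i x then x else ls)) := by
        simp only [pvInnerA]
        split_ifs <;> rfl
      rw [hstep, ih]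

-- pvMinB facts
lemma minB_cons (f : String → Int) (x y : String) (l : List String) :
    pvMinB f x (y :: l) = pvMinB f (if f y < f x then y else x) l := by
  simp only [pvMinB, List.foldl_cons]

lemma minB_le_seed (f : String → Int) :
    ∀ (l : List String) (x : String), f (pvMinB f x l) ≤ f x := by
  intro l
  induction l with
  | nil => intro x; simp [pvMinB]
  | cons y t ih =>
      intro x
      rw [minB_cons]
      by_cases h : f y < f x
      · simp only [if_pos h]
        have := ih y
        omega
      · simp only [if_neg h]
        exact ih x

lemma minB_mem (f : String → Int) :
    ∀ (l : List String) (x : String), pvMinB f x l ∈ x :: l := by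
  intro l
  induction l with
  | nil => intro x; simp [pvMinB]
  | cons y t ih =>
      intro x
      rw [minB_cons]
      by_cases h : f y < f x
      · simp only [if_pos h]
        have := ih y
        simp at this ⊢
        tauto
      · simp only [if_neg h]
        have := ih x
        simp at this ⊢
        tauto

lemma minB_min (f : String → Int) :
    ∀ (l : List String) (x y : String), y ∈ x :: l → f (pvMinB f x l) ≤ f y := by
  intro l
  induction l with
  | nil =>
      intro x y hy
      simp at hy; subst hy; simp [pvMinB]
  | cons z t ih =>
      intro x y hy
      rw [minB_cons]
      simp only [List.mem_cons] at hy
      by_cases hzx : f z < f x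
      · simp only [if_pos hzx]
        have hseed := minB_le_seed f t z
        rcases hy with h | h | h
        · subst h; omega
        · subst h; omega
        · exact ih z y (by simp [h])
      · simp only [if_neg hzx]
        have hseed := minB_le_seed f t x
        rcases hy with h | h | h
        · subst h; omega
        · subst h; omega
        · exact ih x y (by simp [h])

lemma minB_eq_or_lt (f : String → Int) :
    ∀ (l : List String) (x : String), pvMinB f x l = x ∨ f (pvMinB f x l) < f x := by
  intro l
  induction l with
  | nil => intro x; left; simp [pvMinB]
  | cons y t ih =>
      intro x
      rw [minB_cons]
      by_cases h : f y < f x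
      · simp only [if_pos h]
        have hseed := minB_le_seed f t y
        right
        omega
      · simp only [if_neg h]
        exact ih x

lemma minB_seed_irrel (f : String → Int) :
    ∀ (l : List String) (x y : String),
      f (pvMinB f x l) < f x → f (pvMinB f x l) < f y → pvMinB f x l = pvMinB f y l := by
  intro l
  induction l with
  | nil => intro x y h1 _; exact absurd h1 (by simp [pvMinB])
  | cons z t ih =>
      intro x y h1 h2
      rw [minB_cons] at h1 h2 ⊢
      rw [minB_cons (x := y)]
      by_cases hx : f z < f x
      · simp only [if_pos hx] at h1 h2 ⊢
        by_cases hy : f z < f y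
        · simp only [if_pos hy]
        · simp only [if_neg hy]
          have hlt : f (pvMinB f z t) < f z := by
            rcases minB_eq_or_lt f t z with h | h
            · rw [h] at h2; omega
            · exact h
          exact ih z y hlt h2
      · simp only [if_neg hx] at h1 h2 ⊢
        by_cases hy : f z < f y
        · simp only [if_pos hy]
          exact ih x z h1 (by omega)
        · simp only [if_neg hy]
          exact ih x y h1 h2

lemma minB_find? (f : String → Int) :
    ∀ (l : List String) (x : String),
      (x :: l).find? (fun y => decide (f y ≤ f (pvMinB f x l))) = some (pvMinB f x l) := by
  intro l
  induction l with
  | nil => intro x; simp [pvMinB]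
  | cons y t ih =>
      intro x
      rw [minB_cons]
      by_cases hc : f y < f x
      · simp only [if_pos hc]
        have hm : ¬ (f x ≤ f (pvMinB f y t)) := by
          have := minB_le_seed f t y; omega
        rw [List.find?_cons_of_neg (by simpa using hm)]
        exact ih y
      · simp only [if_neg hc]
        rcases minB_eq_or_lt f t x with h | h
        · rw [h]
          rw [List.find?_cons_of_pos (by simp)]
        · have hx : ¬ (f x ≤ f (pvMinB f x t)) := by omega
          have hy : pvMinB f x t = pvMinB f y t := minB_seed_irrel f t x y h (by omega)
          rw [List.find?_cons_of_neg (by simpa using hx), hy]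
          exact ih y

-- pvMaxB facts (mirror images)
lemma maxB_cons (g : String → Int) (x y : String) (l : List String) :
    pvMaxB g x (y :: l) = pvMaxB g (if g x < g y then y else x) l := by
  simp only [pvMaxB, List.foldl_cons]

lemma maxB_ge_seed (g : String → Int) :
    ∀ (l : List String) (x : String), g x ≤ g (pvMaxB g x l) := by
  intro l
  induction l with
  | nil => intro x; simp [pvMaxB]
  | cons y t ih =>
      intro x
      rw [maxB_cons]
      by_cases h : g x < g y
      · simp only [if_pos h]
        have := ih y
        omega
      · simp only [if_neg h]
        exact ih x

lemma maxB_mem (g : String → Int) :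
    ∀ (l : List String) (x : String), pvMaxB g x l ∈ x :: l := by
  intro l
  induction l with
  | nil => intro x; simp [pvMaxB]
  | cons y t ih =>
      intro x
      rw [maxB_cons]
      by_cases h : g x < g y
      · simp only [if_pos h]
        have := ih y
        simp at this ⊢
        tauto
      · simp only [if_neg h]
        have := ih x
        simp at this ⊢
        tauto

lemma maxB_max (g : String → Int) :
    ∀ (l : List String) (x y : String), y ∈ x :: l → g y ≤ g (pvMaxB g x l) := by
  intro l
  induction l with
  | nil =>
      intro x y hy
      simp at hy; subst hy; simp [pvMaxB]
  | cons z t ih =>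
      intro x y hy
      rw [maxB_cons]
      simp only [List.mem_cons] at hy
      by_cases hzx : g x < g z
      · simp only [if_pos hzx]
        have hseed := maxB_ge_seed g t z
        rcases hy with h | h | h
        · subst h; omega
        · subst h; omega
        · exact ih z y (by simp [h])
      · simp only [if_neg hzx]
        have hseed := maxB_ge_seed g t x
        rcases hy with h | h | h
        · subst h; omega
        · subst h; omega
        · exact ih x y (by simp [h])

lemma maxB_eq_or_gt (g : String → Int) :
    ∀ (l : List String) (x : String), pvMaxB g x l = x ∨ g x < g (pvMaxB g x l) := by
  intro l
  induction l with
  | nil => intro x; left; simp [pvMaxB]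
  | cons y t ih =>
      intro x
      rw [maxB_cons]
      by_cases h : g x < g y
      · simp only [if_pos h]
        have hseed := maxB_ge_seed g t y
        right
        omega
      · simp only [if_neg h]
        exact ih x

lemma maxB_seed_irrel (g : String → Int) :
    ∀ (l : List String) (x y : String),
      g x < g (pvMaxB g x l) → g y < g (pvMaxB g x l) → pvMaxB g x l = pvMaxB g y l := by
  intro l
  induction l with
  | nil => intro x y h1 _; exact absurd h1 (by simp [pvMaxB])
  | cons z t ih =>
      intro x y h1 h2
      rw [maxB_cons] at h1 h2 ⊢
      rw [maxB_cons (x := y)]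
      by_cases hx : g x < g z
      · simp only [if_pos hx] at h1 h2 ⊢
        by_cases hy : g y < g z
        · simp only [if_pos hy]
        · simp only [if_neg hy]
          have hlt : g z < g (pvMaxB g z t) := by
            rcases maxB_eq_or_gt g t z with h | h
            · rw [h] at h2; omega
            · exact h
          exact ih z y hlt h2
      · simp only [if_neg hx] at h1 h2 ⊢
        by_cases hy : g y < g z
        · simp only [if_pos hy]
          exact ih x z h1 (by omega)
        · simp only [if_neg hy]
          exact ih x y h1 h2

lemma maxB_find? (g : String → Int) :
    ∀ (l : List String) (x : String),
      (x :: l).find? (fun y => decide (g (pvMaxB g x l) ≤ g y)) = some (pvMaxB g x l) := by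
  intro l
  induction l with
  | nil => intro x; simp [pvMaxB]
  | cons y t ih =>
      intro x
      rw [maxB_cons]
      by_cases hc : g x < g y
      · simp only [if_pos hc]
        have hm : ¬ (g (pvMaxB g y t) ≤ g x) := by
          have := maxB_ge_seed g t y; omega
        rw [List.find?_cons_of_neg (by simpa using hm)]
        exact ih y
      · simp only [if_neg hc]
        rcases maxB_eq_or_gt g t x with h | h
        · rw [h]
          rw [List.find?_cons_of_pos (by simp)]
        · have hx : ¬ (g (pvMaxB g x t) ≤ g x) := by omega
          have hy : pvMaxB g x t = pvMaxB g y t := maxB_seed_irrel g t x y h (by omega)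
          rw [List.find?_cons_of_neg (by simpa using hx), hy]
          exact ih y

-- occurrences
lemma occ_isIn (cs sub : List Char) (i : Nat) (h : sub <+: cs.drop i) :
    PySem.Chars.isIn sub cs = true :=
  (PySem.Chars.exists_prefix_drop_iff_isIn sub cs).mp ⟨i, h⟩

lemma occ_le_find (cs sub : List Char) (i : Nat) (h : sub <+: cs.drop i) :
    PySem.Chars.find cs sub ≤ (i : Int) := by
  have hin := occ_isIn cs sub i h
  have h0 : 0 ≤ PySem.Chars.find cs sub :=
    (PySem.Chars.find_nonneg_iff cs sub).mpr ((PySem.Chars.isIn_iff_infix sub cs).mp hin)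
  have hspec := PySem.Chars.find_spec h0
  by_contra hlt
  exact hspec.2 i (by omega) h

-- rfind.go scans positions k, k-1, …, 0 and returns the highest hit
lemma rfind_go_cases (cs sub : List Char) : ∀ k : Nat,
    (PySem.Chars.rfind.go cs sub k = -1 ∧ ∀ i ≤ k, ¬ sub <+: cs.drop i) ∨
    (∃ j : Nat, j ≤ k ∧ PySem.Chars.rfind.go cs sub k = (j : Int) ∧ sub <+: cs.drop j ∧
      ∀ i, j < i → i ≤ k → ¬ sub <+: cs.drop i) := by
  intro k
  induction k with
  | zero =>
      by_cases h : sub.isPrefixOf cs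
      · right
        exact ⟨0, le_refl 0, by simp [PySem.Chars.rfind.go, h],
          by simpa using List.isPrefixOf_iff_prefix.mp h, by omega⟩
      · left
        refine ⟨by simp [PySem.Chars.rfind.go, h], ?_⟩
        intro i hi
        interval_cases i
        simpa using fun hp => h (List.isPrefixOf_iff_prefix.mpr hp)
  | succ k ih =>
      by_cases h : sub.isPrefixOf (cs.drop (k + 1))
      · right
        exact ⟨k + 1, le_refl _, by simp [PySem.Chars.rfind.go, h],
          List.isPrefixOf_iff_prefix.mp h, by omega⟩
      · have hgo : PySem.Chars.rfind.go cs sub (k + 1) = PySem.Chars.rfind.go cs sub k := by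
          simp [PySem.Chars.rfind.go, h]
        have hk1 : ¬ sub <+: cs.drop (k + 1) := fun hp => h (List.isPrefixOf_iff_prefix.mpr hp)
        rcases ih with ⟨hval, hnone⟩ | ⟨j, hjk, hval, hocc, habove⟩
        · left
          refine ⟨by rw [hgo]; exact hval, ?_⟩
          intro i hi
          rcases Nat.lt_or_ge i (k + 1) with hlt | hge
          · exact hnone i (by omega)
          · have : i = k + 1 := by omega
            subst this; exact hk1
        · right
          refine ⟨j, by omega, by rw [hgo]; exact hval, hocc, ?_⟩
          intro i hji hik
          rcases Nat.lt_or_ge i (k + 1) with hlt | hge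
          · exact habove i hji (by omega)
          · have : i = k + 1 := by omega
            subst this; exact hk1

lemma rfind_of_isIn (cs sub : List Char) (h : PySem.Chars.isIn sub cs = true) :
    ∃ j : Nat, j ≤ cs.length ∧ PySem.Chars.rfind cs sub = (j : Int) ∧ sub <+: cs.drop j ∧
      ∀ i, j < i → i ≤ cs.length → ¬ sub <+: cs.drop i := by
  rcases rfind_go_cases cs sub cs.length with ⟨_, hnone⟩ | ⟨j, hjk, hval, hocc, habove⟩
  · exfalso
    rcases (PySem.Chars.exists_prefix_drop_iff_isIn sub cs).mpr h with ⟨j, hj⟩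
    by_cases hle : j ≤ cs.length
    · exact hnone j hle hj
    · have hd : cs.drop j = [] := List.drop_eq_nil_iff.mpr (by omega)
      rw [hd] at hj
      have : sub = [] := List.prefix_nil.mp hj
      subst this
      exact hnone cs.length (le_refl _) (List.nil_prefix)
  · exact ⟨j, hjk, hval, hocc, habove⟩

lemma occ_le_rfind (cs sub : List Char) (i : Nat) (hi : i ≤ cs.length)
    (h : sub <+: cs.drop i) : (i : Int) ≤ PySem.Chars.rfind cs sub := by
  rcases rfind_of_isIn cs sub (occ_isIn cs sub i h) with ⟨j, _, hval, _, habove⟩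
  rw [hval]
  by_contra hlt
  exact habove i (by omega) hi h

-- find? only looks at members
lemma find?_congr_mem {α : Type} (l : List α) (p q : α → Bool)
    (h : ∀ a ∈ l, p a = q a) : l.find? p = l.find? q := by
  induction l with
  | nil => rfl
  | cons a t ih =>
      rw [List.find?_cons, List.find?_cons, h a (by simp)]
      cases q a
      · exact ih (fun b hb => h b (by simp [hb]))
      · rfl

-- break-on-first-hit scan, left to right
lemma scanUp {β : Type} (g : Nat → Option β) (fm : Nat) (v : β)
    (hnone : ∀ i < fm, g i = none) (hv : g fm = some v) :
    ∀ N, fm < N → (List.range N).findSome? g = some v := by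
  intro N
  induction N with
  | zero => omega
  | succ N ih =>
      intro hN
      rw [List.range_succ, List.findSome?_append]
      rcases Nat.lt_or_ge fm N with hlt | hge
      · rw [ih hlt, Option.some_or]
      · have : fm = N := by omega
        subst this
        have h1 : (List.range fm).findSome? g = none :=
          List.findSome?_eq_none_iff.mpr (fun i hi => hnone i (List.mem_range.mp hi))
        rw [h1, Option.none_or]
        simp [hv]

-- break-on-first-hit scan, right to left
lemma scanDown {β : Type} (g : Nat → Option β) (rm : Nat) (v : β)
    (hv : g rm = some v) :
    ∀ N, rm < N → (∀ i, rm < i → i < N → g i = none) →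
      (List.range N).reverse.findSome? g = some v := by
  intro N
  induction N with
  | zero => omega
  | succ N ih =>
      intro hN hnone
      have hrev : (List.range (N + 1)).reverse = N :: (List.range N).reverse := by
        rw [List.range_succ, List.reverse_append]; rfl
      rw [hrev, List.findSome?_cons]
      rcases Nat.lt_or_ge rm N with hlt | hge
      · rw [hnone N hlt (by omega)]
        exact ih hlt (fun i h1 h2 => hnone i h1 (by omega))
      · have : rm = N := by omega
        subst this
        rw [hv]

-- ===== VERDICT (by name: the statement is the Claim_ definition above) =====
theorem find_first_and_last_occuring_substring_from_list_of_substrings_spec : Claim_equal_find_first_and_last_occuring_substring_from_list_of_substrings := by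
  intro input_str substrings _
  unfold Spec_find_first_and_last_occuring_substring_from_list_of_substrings
  have hfilter : substrings.foldl (pvStepA input_str) none =
      (substrings.filter (fun s => PySem.Str.isIn s input_str)).foldl (pvInnerA input_str) none := by
    rw [show pvStepA input_str =
        fun st s => if PySem.Str.isIn s input_str then pvInnerA input_str st s else st from rfl,
      PySem.List.foldl_if_eq_foldl_filter]
  simp only [find_first_and_last_occuring_substring_from_list_of_substrings,
    find_first_and_last_occuring_substring_from_list_of_substrings_alt, hfilter]
  cases hp : substrings.filter (fun s => PySem.Str.isIn s input_str) with
  | nil =>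
      -- nothing occurs: every match_at is None on both scans
      have hnone : ∀ i : Nat, pvMatchAt input_str substrings i = none := by
        intro i
        apply List.find?_eq_none.mpr
        intro s hs hsw
        have hocc : s.toList <+: input_str.toList.drop i :=
          (PySem.Chars.startswith_iff _ _).mp hsw
        have hin : PySem.Str.isIn s input_str = true := by
          rw [PySem.Str.isIn_eq]; exact occ_isIn _ _ i hocc
        exact (List.filter_eq_nil_iff.mp hp) s hs hin
      have h1 : ∀ (l : List Nat), l.findSome? (pvMatchAt input_str substrings) = none :=
        fun l => List.findSome?_eq_none_iff.mpr (fun i _ => hnone i)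
      simp [h1]
  | cons x t =>
      rw [List.foldl_cons,
        show pvInnerA input_str none x =
          some (x, PySem.Str.find input_str x, x, PySem.Str.rfind input_str x) from rfl,
        innerA_fold]
      have hmemP : ∀ s ∈ x :: t, s ∈ substrings ∧ PySem.Str.isIn s input_str = true := by
        intro s hs
        rw [← hp] at hs
        exact List.mem_filter.mp hs
      have hPmem : ∀ s ∈ substrings, PySem.Str.isIn s input_str = true → s ∈ x :: t := by
        intro s hs hin
        rw [← hp]
        exact List.mem_filter.mpr ⟨hs, hin⟩
      -- ---------- FIRST ----------
      have hfirst :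
          (List.range (input_str.toList.length + 1)).findSome? (pvMatchAt input_str substrings)
            = some (pvMinB (fun s => PySem.Str.find input_str s) x t) := by
        set f := fun s => PySem.Str.find input_str s with hf
        set m := pvMinB f x t with hm
        have hmin : PySem.Str.isIn m input_str = true := (hmemP m (minB_mem f t x)).2
        have hm0 : 0 ≤ f m := by
          rw [hf]
          simp only [PySem.Str.find_eq]
          exact (PySem.Chars.find_nonneg_iff _ _).mpr
            ((PySem.Chars.isIn_iff_infix _ _).mp (by rw [← PySem.Str.isIn_eq]; exact hmin))
        have hmlen : f m ≤ (input_str.toList.length : Int) := by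
          rw [hf]; simp only [PySem.Str.find_eq]
          exact PySem.Chars.find_le_length _ _
        have hcast : ((f m).toNat : Int) = f m := Int.toNat_of_nonneg hm0
        apply scanUp (pvMatchAt input_str substrings) (f m).toNat m
        · -- below the first occurrence nothing matches
          intro i hi
          apply List.find?_eq_none.mpr
          intro s hs hsw
          have hocc : s.toList <+: input_str.toList.drop i :=
            (PySem.Chars.startswith_iff _ _).mp hsw
          have hle : f s ≤ (i : Int) := by
            rw [hf]; simp only [PySem.Str.find_eq]
            exact occ_le_find _ _ i hocc
          have hin : PySem.Str.isIn s input_str = true := by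
            rw [PySem.Str.isIn_eq]; exact occ_isIn _ _ i hocc
          have hge : f m ≤ f s := minB_min f t x s (hPmem s hs hin)
          omega
        · -- at the first occurrence the scan finds exactly m
          unfold pvMatchAt
          have hpt : ∀ s ∈ substrings,
              (PySem.Chars.startswith (input_str.toList.drop (f m).toNat) s.toList)
                = (PySem.Str.isIn s input_str && decide (f s ≤ f m)) := by
            intro s hs
            by_cases hsw : PySem.Chars.startswith (input_str.toList.drop (f m).toNat) s.toList = true
            · rw [hsw]
              have hocc : s.toList <+: input_str.toList.drop (f m).toNat :=
                (PySem.Chars.startswith_iff _ _).mp hsw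
              have hin : PySem.Str.isIn s input_str = true := by
                rw [PySem.Str.isIn_eq]; exact occ_isIn _ _ _ hocc
              have hle : f s ≤ f m := by
                have h1 := occ_le_find input_str.toList s.toList (f m).toNat hocc
                rw [Int.toNat_of_nonneg hm0] at h1
                show PySem.Str.find input_str s ≤ f m
                rw [PySem.Str.find_eq]
                exact h1
              rw [hin]
              simp [hle]
            · rw [Bool.eq_false_iff.mpr hsw]
              symm
              rw [Bool.and_eq_false_iff]
              by_cases hin : PySem.Str.isIn s input_str = true
              · right
                simp only [decide_eq_false_iff_not]
                intro hle
                have hge : f m ≤ f s := minB_min f t x s (hPmem s hs hin)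
                have heq : f s = f m := by omega
                have h0s : 0 ≤ f s := by omega
                have hspec := PySem.Chars.find_spec (s := input_str.toList) (sub := s.toList)
                  (by rw [hf] at h0s; simp only [PySem.Str.find_eq] at h0s; exact h0s)
                have : (PySem.Chars.find input_str.toList s.toList).toNat = (f m).toNat := by
                  rw [hf] at heq; simp only [PySem.Str.find_eq] at heq
                  rw [heq, show PySem.Chars.find input_str.toList m.toList = f m from
                    (PySem.Str.find_eq input_str m).symm]
                rw [this] at hspec
                exact hsw ((PySem.Chars.startswith_iff _ _).mpr hspec.1)
              · left; exact Bool.eq_false_iff.mpr hin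
          rw [find?_congr_mem substrings _ _ hpt]
          have hfilt : substrings.find? (fun s => PySem.Str.isIn s input_str && decide (f s ≤ f m))
              = (substrings.filter (fun s => PySem.Str.isIn s input_str)).find?
                  (fun s => decide (f s ≤ f m)) := by
            rw [List.find?_filter]
            apply find?_congr_mem
            intro a _
            by_cases h1 : PySem.Str.isIn a input_str = true <;> by_cases h2 : f a ≤ f m <;>
              simp [h2]
          rw [hfilt, hp]
          exact minB_find? f t x
        · omega
      -- ---------- LAST ----------
      have hlast :
          (List.range (input_str.toList.length + 1)).reverse.findSome? (pvMatchAt input_str substrings)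
            = some (pvMaxB (fun s => PySem.Str.rfind input_str s) x t) := by
        set g := fun s => PySem.Str.rfind input_str s with hg
        set M := pvMaxB g x t with hM
        have hMin : PySem.Str.isIn M input_str = true := (hmemP M (maxB_mem g t x)).2
        rcases rfind_of_isIn input_str.toList M.toList
            (by rw [← PySem.Str.isIn_eq]; exact hMin) with ⟨j, hjlen, hval, hocc, habove⟩
        have hgM : g M = (j : Int) := by rw [hg]; simp only [PySem.Str.rfind_eq]; exact hval
        apply scanDown (pvMatchAt input_str substrings) j M
        · -- at position j the scan finds exactly M
          unfold pvMatchAt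
          have hpt : ∀ s ∈ substrings,
              (PySem.Chars.startswith (input_str.toList.drop j) s.toList)
                = (PySem.Str.isIn s input_str && decide (g M ≤ g s)) := by
            intro s hs
            by_cases hsw : PySem.Chars.startswith (input_str.toList.drop j) s.toList = true
            · rw [hsw]
              have hoccs : s.toList <+: input_str.toList.drop j :=
                (PySem.Chars.startswith_iff _ _).mp hsw
              have hin : PySem.Str.isIn s input_str = true := by
                rw [PySem.Str.isIn_eq]; exact occ_isIn _ _ _ hoccs
              have hle : g M ≤ g s := by
                have := occ_le_rfind input_str.toList s.toList j hjlen hoccs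
                rw [hg]; simp only [PySem.Str.rfind_eq]
                omega
              rw [hin]
              simp [hle]
            · rw [Bool.eq_false_iff.mpr hsw]
              symm
              rw [Bool.and_eq_false_iff]
              by_cases hin : PySem.Str.isIn s input_str = true
              · right
                simp only [decide_eq_false_iff_not]
                intro hle
                have hge : g s ≤ g M := maxB_max g t x s (hPmem s hs hin)
                have heq : g s = g M := by omega
                rcases rfind_of_isIn input_str.toList s.toList
                    (by rw [← PySem.Str.isIn_eq]; exact hin) with ⟨j', _, hval', hocc', _⟩
                have hj' : j' = j := by
                  have : g s = (j' : Int) := by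
                    rw [hg]; simp only [PySem.Str.rfind_eq]; exact hval'
                  omega
                rw [hj'] at hocc'
                exact hsw ((PySem.Chars.startswith_iff _ _).mpr hocc')
              · left; exact Bool.eq_false_iff.mpr hin
          rw [find?_congr_mem substrings _ _ hpt]
          have hfilt : substrings.find? (fun s => PySem.Str.isIn s input_str && decide (g M ≤ g s))
              = (substrings.filter (fun s => PySem.Str.isIn s input_str)).find?
                  (fun s => decide (g M ≤ g s)) := by
            rw [List.find?_filter]
            apply find?_congr_mem
            intro a _
            by_cases h1 : PySem.Str.isIn a input_str = true <;> by_cases h2 : g M ≤ g a <;>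
              simp [h2]
          rw [hfilt, hp]
          exact maxB_find? g t x
        · omega
        · -- above the last occurrence nothing matches
          intro i hji hiN
          apply List.find?_eq_none.mpr
          intro s hs hsw
          have hoccs : s.toList <+: input_str.toList.drop i :=
            (PySem.Chars.startswith_iff _ _).mp hsw
          have hin : PySem.Str.isIn s input_str = true := by
            rw [PySem.Str.isIn_eq]; exact occ_isIn _ _ i hoccs
          have hle : (i : Int) ≤ g s := by
            have := occ_le_rfind input_str.toList s.toList i (by omega) hoccs
            rw [hg]; simp only [PySem.Str.rfind_eq]
            omega
          have hge : g s ≤ g M := maxB_max g t x s (hPmem s hs hin)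
          omega
      simp only [hfirst, hlast]
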